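-- pv_equiv track=rewrite | github.com/pypi-data/pypi-mirror-392 | packages/crossmark-jotform-api/crossmark_jotform_api-2.5.11-py3-none-any.whl/crossmark_jotform_api/jotForm.py | set_answers
-- ===== SOURCE A (Python) =====
-- from typing import Union, Dict, Optional, List
--
-- def set_answers(answers) -> List[Optional[str]]:
--     """## This function sets the answers array
--
--     Args:
--         answers (_type_): _description_
--
--     Returns:
--         List[Optional[str]]: _description_
--     """
--     answers_arr = []
--     if answers is None:
--         return answers_arr
--     for key, value in answers.items():
--         name = None
--         if "name" in value:
--             name = value["name"]
--         answer = None
--         if "answer" in value: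
--             answer = value["answer"]
--         _type = None
--         if "type" in value:
--             _type = value["type"]
--         text = None
--         if "text" in value:
--             text = value["text"]
--         file = None
--         if "file" in value:
--             file = value["file"]
--         answers_arr.append(
--             {
--                 "key": key,
--                 "name": name,
--                 "answer": answer,
--                 "type": _type,
--                 "text": text,
--                 "file": file,
--             }
--         )
--     return answers_arr
-- ===== SOURCE B (Python) =====
-- FIELDS = ("name", "answer", "type", "text", "file")
--
-- def set_answers(answers):
--     if answers is None:
--         return []
--     out = []
--     for key, value in answers.items():
--         found = {}
--         for k, v in value.items():
--             if k in FIELDS: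
--                 found.setdefault(k, v)
--         out.append({"key": key, **{f: found.get(f) for f in FIELDS}})
--     return out
-- ===== Notes on version B (the rewrite author's own statement) =====
-- stated objective: alternative
-- what changed: Instead of probing the value dict five separate times (one membership test + lookup per field), B makes a single pass over value.items(), harvesting the wanted fields into a collection dict, and then emits the record from that collection.
import Mathlib
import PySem

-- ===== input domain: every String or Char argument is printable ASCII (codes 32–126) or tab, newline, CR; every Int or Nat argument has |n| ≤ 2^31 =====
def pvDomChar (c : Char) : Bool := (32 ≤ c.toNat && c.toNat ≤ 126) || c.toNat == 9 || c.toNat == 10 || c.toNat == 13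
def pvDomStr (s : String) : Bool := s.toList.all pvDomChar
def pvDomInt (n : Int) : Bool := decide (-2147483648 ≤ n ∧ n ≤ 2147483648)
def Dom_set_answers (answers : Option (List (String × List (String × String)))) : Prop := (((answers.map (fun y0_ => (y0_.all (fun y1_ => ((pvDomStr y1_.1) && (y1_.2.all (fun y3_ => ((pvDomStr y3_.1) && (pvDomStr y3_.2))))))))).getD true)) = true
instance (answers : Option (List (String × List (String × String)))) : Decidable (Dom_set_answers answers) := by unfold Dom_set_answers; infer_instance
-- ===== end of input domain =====

-- B replaces A's five per-field probes of each value dict (membership test + lookup per field)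
-- by ONE pass over the value's items harvesting the wanted fields into a collection dict
-- (first occurrence wins), then emits the record from that collection (objective: alternative).

-- ===== PORT A =====
-- `"f" in value` followed by `value["f"]` on a dict = first-match association lookup
def pvLookup (v : List (String × String)) (f : String) : Option String :=
  (v.find? (fun p => p.1 == f)).map (·.2)

def set_answers (answers : Option (List (String × List (String × String)))) : List (List (String × Option String)) :=
  match answers with
  | none => []
  | some a =>
    a.foldl (fun answers_arr kv =>
      let name := pvLookup kv.2 "name"
      let answer := pvLookup kv.2 "answer"
      let _type := pvLookup kv.2 "type"
      let text := pvLookup kv.2 "text"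
      let file := pvLookup kv.2 "file"
      answers_arr ++ [[("key", some kv.1), ("name", name), ("answer", answer),
                       ("type", _type), ("text", text), ("file", file)]]) []

-- ===== PORT B =====
def pvFields : List String := ["name", "answer", "type", "text", "file"]

-- the inner loop of Source B: one scan of value.items(), found.setdefault(k, v) for wanted keys
def pvCollect (items : List (String × String)) : PySem.Dict String String :=
  items.foldl
    (fun found p => if pvFields.contains p.1 then found.setdefault p.1 p.2 else found)
    PySem.Dict.empty

def set_answers_alt (answers : Option (List (String × List (String × String)))) : List (List (String × Option String)) :=
  match answers with
  | none => []
  | some a =>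
    a.foldl (fun out kv =>
      let found := pvCollect kv.2
      out ++ [("key", some kv.1) :: pvFields.map (fun f => (f, found.get? f))]) []

-- ===== PRECONDITION & SPEC =====
def Spec_set_answers (answers : Option (List (String × List (String × String)))) (out : List (List (String × Option String))) : Prop := out = set_answers_alt answers
instance (answers : Option (List (String × List (String × String)))) (out : List (List (String × Option String))) : Decidable (Spec_set_answers answers out) := by unfold Spec_set_answers; infer_instance

-- ===== CLAIM =====
def Claim_equal_set_answers : Prop := ∀ (answers : Option (List (String × List (String × String)))), Dom_set_answers answers → Spec_set_answers answers (set_answers answers)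

-- ===== LEMMAS AND PROOFS =====
-- The collection fold's lookup is the first match among wanted keys, on top of the accumulator.
theorem pvCollect_fold_get (l : List (String × String)) (d : PySem.Dict String String)
    (f : String) (hf : f ∈ pvFields) :
    (l.foldl (fun found p => if pvFields.contains p.1 then found.setdefault p.1 p.2 else found) d).get? f
      = (d.get? f).or (pvLookup l f) := by
  induction l generalizing d with
  | nil => simp [pvLookup]
  | cons p t ih =>
    simp only [List.foldl_cons, ih]
    by_cases hk : p.1 = f
    · subst hk
      have hc : pvFields.contains p.1 := by
        simpa [List.contains_iff_mem] using hf
      rw [if_pos hc]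
      have : (d.setdefault p.1 p.2).get? p.1 = some ((d.get? p.1).getD p.2) :=
        PySem.Dict.get?_setdefault_self d p.1 p.2
      rw [this]
      cases h : d.get? p.1 <;> simp [pvLookup]
    · have hstep : (if pvFields.contains p.1 then d.setdefault p.1 p.2 else d).get? f = d.get? f := by
        split
        · by_cases hc : d.contains p.1
          · simp [PySem.Dict.setdefault_of_contains, hc]
          · rw [PySem.Dict.setdefault_of_not_contains (h := by simpa using hc)]
            exact PySem.Dict.get?_insert_of_ne d p.2 (fun h => hk h.symm)
        · rfl
      rw [hstep]
      have hbeq : (p.1 == f) = false := by simpa using hk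
      simp [pvLookup, hbeq]

theorem pvCollect_get (l : List (String × String)) (f : String) (hf : f ∈ pvFields) :
    (pvCollect l).get? f = pvLookup l f := by
  unfold pvCollect
  rw [pvCollect_fold_get l PySem.Dict.empty f hf]
  simp

-- ===== VERDICT =====
theorem set_answers_spec : Claim_equal_set_answers := by
  intro answers _
  unfold Spec_set_answers set_answers set_answers_alt
  cases answers with
  | none => rfl
  | some a =>
    dsimp only
    rw [PySem.List.foldl_append_singleton_eq_map, PySem.List.foldl_append_singleton_eq_map]
    refine List.map_congr_left (fun kv _ => ?_)
    have h1 := pvCollect_get kv.2 "name" (by decide)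
    have h2 := pvCollect_get kv.2 "answer" (by decide)
    have h3 := pvCollect_get kv.2 "type" (by decide)
    have h4 := pvCollect_get kv.2 "text" (by decide)
    have h5 := pvCollect_get kv.2 "file" (by decide)
    simp [pvFields, h1, h2, h3, h4, h5]
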